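-- pv_equiv track=rewrite | github.com/PrithwishJana/CoTran | transpilers/TSS_CodeConv_PyTranslations/82/GFG.py | findNumberOfEvenCells
-- ===== SOURCE A (Python) =====
-- import math
--
-- def findNumberOfEvenCells(n, q, size):
--     row = [0 for _ in range(n)]
--     col = [0 for _ in range(n)]
--     for i in range(0, size):
--         x = q [i][0]
--         y = q [i][1]
--         row [x - 1] += 1
--         col [y - 1] += 1
--     r1 = 0
--     r2 = 0
--     c1 = 0
--     c2 = 0
--     for i in range(0, n):
--         if math.fmod(row [i], 2) == 0:
--             r1 += 1
--         if math.fmod(row [i], 2) == 1: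
--             r2 += 1
--         if math.fmod(col [i], 2) == 0:
--             c1 += 1
--         if math.fmod(col [i], 2) == 1:
--             c2 += 1
--     count = r1 * c1 + r2 * c2
--     return count
-- ===== SOURCE B (Python) =====
-- def findNumberOfEvenCells(n, q, size):
--     # Naive solution: materialize the n x n grid, apply each query's row and
--     # column increments, then scan the whole grid counting even cells.
--     grid = [[0] * n for _ in range(n)]
--     for i in range(size):
--         x = q[i][0]
--         y = q[i][1]
--         for j in range(n):
--             grid[x - 1][j] += 1
--         for j in range(n):
--             grid[j][y - 1] += 1
--     return sum(1 for r in grid for v in r if v % 2 == 0)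
-- ===== Notes on version B (the rewrite author's own statement) =====
-- stated objective: simpler
-- what changed: B materializes the n-by-n grid, applies each query's row and column increments cell by cell, and counts even cells by a full scan, replacing A's two length-n parity counter arrays and the four-counter product formula; Pre_ excludes only the inputs on which A raises IndexError (size beyond len(q), a processed query with fewer than two entries, or an index outside the valid Python range).
import Mathlib
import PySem

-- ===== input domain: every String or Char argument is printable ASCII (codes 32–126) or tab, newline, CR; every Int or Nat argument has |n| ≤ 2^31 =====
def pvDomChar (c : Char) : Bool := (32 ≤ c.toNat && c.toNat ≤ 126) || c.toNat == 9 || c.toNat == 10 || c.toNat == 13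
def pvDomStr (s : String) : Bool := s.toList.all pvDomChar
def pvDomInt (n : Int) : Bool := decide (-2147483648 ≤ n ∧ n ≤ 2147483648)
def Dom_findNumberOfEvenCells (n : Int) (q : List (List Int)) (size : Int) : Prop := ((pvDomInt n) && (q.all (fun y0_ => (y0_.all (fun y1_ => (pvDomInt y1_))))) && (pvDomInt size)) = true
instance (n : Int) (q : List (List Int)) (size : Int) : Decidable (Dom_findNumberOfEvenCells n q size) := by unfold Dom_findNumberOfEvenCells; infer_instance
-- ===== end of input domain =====

-- B replaces A's two length-n parity counter arrays and product formula with the naive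
-- solution: materialize the n×n grid, apply every increment, scan and count even cells.

-- ===== PORT A =====
-- `lst[idx] += 1` at a Python index (negative wraps); no-op exactly where Python would raise
-- IndexError (those inputs are excluded by Pre_)
def pyAdjust {alpha : Type} (xs : List alpha) (i : Int) (f : alpha → alpha) : List alpha :=
  let j : Int := if i < 0 then i + (xs.length : Int) else i
  if 0 ≤ j then xs.modify j.toNat f else xs

-- one iteration of A's query loop, applied to the fetched query list q[i]
def stepA (rc : List Int × List Int) (l : List Int) : List Int × List Int :=
  (pyAdjust rc.1 (PySem.List.pyGetD l 0 0 - 1) (· + 1),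
   pyAdjust rc.2 (PySem.List.pyGetD l 1 0 - 1) (· + 1))

def findNumberOfEvenCells (n : Int) (q : List (List Int)) (size : Int) : Int :=
  let row0 : List Int := (PySem.List.pyRange 0 n 1).map (fun _ => 0)
  let col0 : List Int := (PySem.List.pyRange 0 n 1).map (fun _ => 0)
  let rc := (PySem.List.pyRange 0 size 1).foldl
    (fun rc i => stepA rc (PySem.List.pyGetD q i [])) (row0, col0)
  -- second loop: the four parity counters (math.fmod(v, 2) on these nonnegative ints is v % 2)
  let cs := (PySem.List.pyRange 0 n 1).foldl (fun (acc : Int × Int × Int × Int) i =>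
      let r1 := if PySem.Int.mod (PySem.List.pyGetD rc.1 i 0) 2 = 0 then acc.1 + 1 else acc.1
      let r2 := if PySem.Int.mod (PySem.List.pyGetD rc.1 i 0) 2 = 1 then acc.2.1 + 1 else acc.2.1
      let c1 := if PySem.Int.mod (PySem.List.pyGetD rc.2 i 0) 2 = 0 then acc.2.2.1 + 1 else acc.2.2.1
      let c2 := if PySem.Int.mod (PySem.List.pyGetD rc.2 i 0) 2 = 1 then acc.2.2.2 + 1 else acc.2.2.2
      (r1, r2, c1, c2)) (0, 0, 0, 0)
  cs.1 * cs.2.2.1 + cs.2.1 * cs.2.2.2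

-- ===== PORT B =====
-- one iteration of B's query loop: bump every cell of row x-1, then every cell of column y-1
-- (grid[x-1][j] += 1 and grid[j][y-1] += 1, Python indexing)
def stepB (n : Int) (g : List (List Int)) (l : List Int) : List (List Int) :=
  let x := PySem.List.pyGetD l 0 0
  let y := PySem.List.pyGetD l 1 0
  let g1 := (PySem.List.pyRange 0 n 1).foldl
    (fun g' j => pyAdjust g' (x - 1) (fun r => pyAdjust r j (· + 1))) g
  (PySem.List.pyRange 0 n 1).foldl
    (fun g' j => pyAdjust g' j (fun r => pyAdjust r (y - 1) (· + 1))) g1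

def findNumberOfEvenCells_alt (n : Int) (q : List (List Int)) (size : Int) : Int :=
  let grid0 : List (List Int) :=
    (PySem.List.pyRange 0 n 1).map (fun _ => List.replicate n.toNat (0 : Int))
  let grid := (PySem.List.pyRange 0 size 1).foldl
    (fun g i => stepB n g (PySem.List.pyGetD q i [])) grid0
  grid.foldl (fun acc r =>
    r.foldl (fun a v => if PySem.Int.mod v 2 = 0 then a + 1 else a) acc) 0

-- ===== PRECONDITION & SPEC =====
-- Pre_ excludes exactly the inputs where Python A raises IndexError: size beyond the end of q,
-- a processed query with fewer than two entries, or a query value that is no valid Python index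
-- into the length-n row/col arrays.
def Pre_findNumberOfEvenCells (n : Int) (q : List (List Int)) (size : Int) : Prop :=
  size ≤ (q.length : Int) ∧
  ∀ l ∈ q.take size.toNat, 2 ≤ l.length ∧
    (-n ≤ PySem.List.pyGetD l 0 0 - 1 ∧ PySem.List.pyGetD l 0 0 - 1 < n) ∧
    (-n ≤ PySem.List.pyGetD l 1 0 - 1 ∧ PySem.List.pyGetD l 1 0 - 1 < n)
instance (n : Int) (q : List (List Int)) (size : Int) : Decidable (Pre_findNumberOfEvenCells n q size) := by unfold Pre_findNumberOfEvenCells; infer_instance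

def pvWitness_findNumberOfEvenCells : Int × List (List Int) × Int := (3, [[1, 2], [2, 3]], 2)

def Spec_findNumberOfEvenCells (n : Int) (q : List (List Int)) (size : Int) (out : Int) : Prop := out = findNumberOfEvenCells_alt n q size
instance (n : Int) (q : List (List Int)) (size : Int) (out : Int) : Decidable (Spec_findNumberOfEvenCells n q size out) := by unfold Spec_findNumberOfEvenCells; infer_instance

-- ===== CLAIM (what is proved, stated in full; the proofs are below) =====
def Claim_equal_findNumberOfEvenCells : Prop := ∀ (n : Int) (q : List (List Int)) (size : Int), Dom_findNumberOfEvenCells n q size → Pre_findNumberOfEvenCells n q size → Spec_findNumberOfEvenCells n q size (findNumberOfEvenCells n q size)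

-- ===== LEMMAS AND PROOFS =====

theorem length_pyAdjust {alpha : Type} (l : List alpha) (i : Int) (f : alpha → alpha) :
    (pyAdjust l i f).length = l.length := by
  unfold pyAdjust
  dsimp only
  split_ifs <;> simp

theorem pyRange_toNat (n : Int) :
    PySem.List.pyRange 0 n 1 = PySem.List.pyRange 0 ((n.toNat : Nat) : Int) 1 := by
  by_cases h : 0 ≤ n
  · rw [Int.toNat_of_nonneg h]
  · rw [PySem.List.pyRange_one_eq_nil (by omega), PySem.List.pyRange_one_eq_nil (by omega)]

-- a loop 'for i in range(k): … xs[i] …' with k ≤ len(xs) is a fold over the prefix xs[:k]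
theorem foldl_pyRange_take {alpha beta : Type} (xs : List alpha) (d : alpha) (F : beta → alpha → beta)
    (init : beta) (k : Nat) (hk : k ≤ xs.length) :
    (PySem.List.pyRange 0 (k : Int) 1).foldl (fun acc i => F acc (PySem.List.pyGetD xs i d)) init
      = (xs.take k).foldl F init := by
  induction k with
  | zero => simp [PySem.List.pyRange_one_eq_nil]
  | succ k ih =>
    have hk' : k ≤ xs.length := by omega
    have hcast : ((k + 1 : Nat) : Int) = (k : Int) + 1 := by push_cast; ring
    rw [hcast, PySem.List.pyRange_one_succ_right (by positivity), List.foldl_append, ih hk']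
    have hkl : k < xs.length := by omega
    have hx : PySem.List.pyGetD xs ((k : Nat) : Int) d = xs[k] := by
      rw [PySem.List.pyGetD_eq_getElem xs d (by positivity) (by exact_mod_cast hkl)]
      simp
    conv_rhs => rw [List.take_add_one, List.getElem?_eq_getElem hkl]
    rw [List.foldl_append]
    simp [hx]

-- the grid a maintainer has in mind: cell (i, j) holds row[i] + col[j]
def GG (row col : List Int) : List (List Int) :=
  row.map (fun a => col.map (fun b => a + b))

theorem modify_id {alpha : Type} (l : List alpha) (k : Nat) :
    l.modify k (fun a => a) = l := by
  apply List.ext_getElem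
  · simp
  · intro i h1 h2
    rw [List.getElem_modify]
    split <;> rfl

theorem modify_modify {alpha : Type} (l : List alpha) (k : Nat) (f g : alpha → alpha) :
    (l.modify k f).modify k g = l.modify k (fun a => g (f a)) := by
  apply List.ext_getElem
  · simp
  · intro i h1 h2
    rw [List.getElem_modify, List.getElem_modify, List.getElem_modify]
    split <;> rfl

theorem modify_map {alpha beta : Type} (l : List alpha) (h : alpha → beta) (k : Nat)
    (F : beta → beta) (f : alpha → alpha) (hc : ∀ a, F (h a) = h (f a)) :
    (l.map h).modify k F = (l.modify k f).map h := by
  apply List.ext_getElem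
  · simp
  · intro i h1 h2
    rw [List.getElem_modify]
    simp only [List.getElem_map] at *
    rw [List.getElem_modify]
    split
    · exact hc _
    · rfl

theorem pyAdjust_id {alpha : Type} (g : List alpha) (p : Int) :
    pyAdjust g p (fun a => a) = g := by
  unfold pyAdjust
  dsimp only
  split_ifs <;> first | apply modify_id | rfl

theorem pyAdjust_comp {alpha : Type} (g : List alpha) (p : Int) (f1 f2 : alpha → alpha) :
    pyAdjust (pyAdjust g p f1) p f2 = pyAdjust g p (fun a => f2 (f1 a)) := by
  unfold pyAdjust
  dsimp only
  split_ifs with h1 h2 h2 <;>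
    simp_all [List.length_modify, modify_modify]

theorem pyAdjust_map {alpha beta : Type} (l : List alpha) (h : alpha → beta) (p : Int)
    (F : beta → beta) (f : alpha → alpha) (hc : ∀ a, F (h a) = h (f a)) :
    pyAdjust (l.map h) p F = (pyAdjust l p f).map h := by
  unfold pyAdjust
  dsimp only
  rw [List.length_map]
  split_ifs <;> first | exact modify_map l h _ F f hc | rfl

-- repeated pyAdjust at one fixed position is one pyAdjust with the folded function
theorem pyAdjust_fold {alpha : Type} (js : List Int) (g : List alpha) (p : Int)
    (F : Int → alpha → alpha) :
    js.foldl (fun g' j => pyAdjust g' p (F j)) g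
      = pyAdjust g p (fun r => js.foldl (fun r j => F j r) r) := by
  induction js generalizing g with
  | nil => simp [pyAdjust_id]
  | cons j js ih =>
    simp only [List.foldl_cons]
    rw [ih, pyAdjust_comp]

theorem modify_append_cons {alpha : Type} (A : List alpha) (c : alpha) (B : List alpha)
    (f : alpha → alpha) :
    (A ++ c :: B).modify A.length f = A ++ f c :: B := by
  rw [List.modify_eq_take_cons_drop (by simp)]
  congr 1
  · simp
  congr 1
  · congr 1
    simp
  · rw [show A.length + 1 = (A ++ [c]).length by simp]
    rw [show A ++ c :: B = (A ++ [c]) ++ B by simp]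
    simp

-- 'for j in range(len(g)): g[j] = f(g[j])' maps f over g
theorem sweep_aux {alpha : Type} (g : List alpha) (f : alpha → alpha) (k : Nat)
    (hk : k ≤ g.length) :
    (PySem.List.pyRange 0 (k : Int) 1).foldl (fun g' j => pyAdjust g' j f) g
      = (g.take k).map f ++ g.drop k := by
  induction k with
  | zero => simp [PySem.List.pyRange_one_eq_nil]
  | succ k ih =>
    have hk' : k ≤ g.length := by omega
    have hkl : k < g.length := by omega
    have hcast : ((k + 1 : Nat) : Int) = (k : Int) + 1 := by push_cast; ring
    rw [hcast, PySem.List.pyRange_one_succ_right (by omega), List.foldl_append, ih hk']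
    simp only [List.foldl_cons, List.foldl_nil]
    have hlenA : ((g.take k).map f).length = k := by
      simp [List.length_take, Nat.min_eq_left hk']
    have hP : pyAdjust ((g.take k).map f ++ g.drop k) ((k : Nat) : Int) f
        = (((g.take k).map f ++ g.drop k)).modify k f := by
      unfold pyAdjust
      dsimp only
      rw [if_neg (show ¬(((k : Nat) : Int) < 0) by omega)]
      rw [if_pos (show (0 : Int) ≤ ((k : Nat) : Int) by omega), Int.toNat_natCast]
    rw [hP, List.drop_eq_getElem_cons hkl]
    have hm := modify_append_cons ((g.take k).map f) g[k] (g.drop (k + 1)) f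
    rw [hlenA] at hm
    rw [hm, List.take_add_one, List.getElem?_eq_getElem hkl]
    simp only [Option.toList_some, List.map_append, List.map_cons, List.map_nil,
      List.append_assoc, List.cons_append, List.nil_append]

theorem sweep {alpha : Type} (g : List alpha) (f : alpha → alpha) :
    (PySem.List.pyRange 0 ((g.length : Nat) : Int) 1).foldl (fun g' j => pyAdjust g' j f) g
      = g.map f := by
  rw [sweep_aux g f g.length (le_refl _)]
  simp

-- one query moves the represented grid exactly as stepA moves the counter arrays
theorem stepB_G (n : Int) (row col : List Int) (l : List Int)
    (hr : row.length = n.toNat) (hc : col.length = n.toNat) (hn : 0 < n) :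
    stepB n (GG row col) l = GG (stepA (row, col) l).1 (stepA (row, col) l).2 := by
  have hncast : n = ((n.toNat : Nat) : Int) := by omega
  unfold stepB stepA GG
  dsimp only
  rw [pyAdjust_fold]
  rw [pyAdjust_map row (fun a => col.map (fun b => a + b)) _ _ (· + 1) (by
    intro a
    dsimp only
    rw [show PySem.List.pyRange 0 n 1
        = PySem.List.pyRange 0 (((col.map (fun b => a + b)).length : Nat) : Int) 1 from by
      rw [List.length_map, hc, ← hncast]]
    rw [sweep, List.map_map]
    apply List.map_congr_left
    intro b _
    simp only [Function.comp_apply]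
    ring)]
  rw [show PySem.List.pyRange 0 n 1
      = PySem.List.pyRange 0 ((((pyAdjust row (PySem.List.pyGetD l 0 0 - 1) (· + 1)).map
          (fun a => col.map (fun b => a + b))).length : Nat) : Int) 1 from by
    rw [List.length_map, length_pyAdjust, hr, ← hncast]]
  rw [sweep, List.map_map]
  apply List.map_congr_left
  intro a _
  simp only [Function.comp_apply]
  exact pyAdjust_map col (fun b => a + b) _ (· + 1) (· + 1) (fun b => by ring)

theorem grid_fold (n : Int) (L : List (List Int))
    (hL : ∀ l ∈ L,
      (-n ≤ PySem.List.pyGetD l 0 0 - 1 ∧ PySem.List.pyGetD l 0 0 - 1 < n) ∧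
      (-n ≤ PySem.List.pyGetD l 1 0 - 1 ∧ PySem.List.pyGetD l 1 0 - 1 < n))
    (row col : List Int) (hr : row.length = n.toNat) (hc : col.length = n.toNat) :
    L.foldl (stepB n) (GG row col)
      = GG (L.foldl stepA (row, col)).1 (L.foldl stepA (row, col)).2 ∧
    (L.foldl stepA (row, col)).1.length = n.toNat ∧
    (L.foldl stepA (row, col)).2.length = n.toNat := by
  induction L generalizing row col with
  | nil => exact ⟨rfl, hr, hc⟩
  | cons l L ih =>
    obtain ⟨⟨hx0, hx1⟩, _⟩ := hL l (by simp)
    have hn : 0 < n := by omega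
    simp only [List.foldl_cons]
    rw [stepB_G n row col l hr hc hn]
    exact ih (fun l' hl' => hL l' (List.mem_cons_of_mem l hl'))
      _ _ (by simp [stepA, length_pyAdjust, hr]) (by simp [stepA, length_pyAdjust, hc])

theorem countP_zip_fst (row col : List Int) (h : row.length = col.length) (p : Int → Bool) :
    (row.zip col).countP (fun q => p q.1) = row.countP p := by
  have h1 : (row.zip col).map Prod.fst = row := List.map_fst_zip (by omega)
  rw [show (fun q : Int × Int => p q.1) = (p ∘ Prod.fst) from rfl, ← List.countP_map, h1]

theorem countP_zip_snd (row col : List Int) (h : row.length = col.length) (p : Int → Bool) :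
    (row.zip col).countP (fun q => p q.2) = col.countP p := by
  have h1 : (row.zip col).map Prod.snd = col := List.map_snd_zip (by omega)
  rw [show (fun q : Int × Int => p q.2) = (p ∘ Prod.snd) from rfl, ← List.countP_map, h1]

theorem countA (row col : List Int) (n : Int) (hr : row.length = n.toNat)
    (hc : col.length = n.toNat) :
    (PySem.List.pyRange 0 n 1).foldl (fun (acc : Int × Int × Int × Int) i =>
      ((if PySem.Int.mod (PySem.List.pyGetD row i 0) 2 = 0 then acc.1 + 1 else acc.1),
       (if PySem.Int.mod (PySem.List.pyGetD row i 0) 2 = 1 then acc.2.1 + 1 else acc.2.1),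
       (if PySem.Int.mod (PySem.List.pyGetD col i 0) 2 = 0 then acc.2.2.1 + 1 else acc.2.2.1),
       (if PySem.Int.mod (PySem.List.pyGetD col i 0) 2 = 1 then acc.2.2.2 + 1 else acc.2.2.2)))
      (0, 0, 0, 0)
    = ((row.countP (fun v => decide (PySem.Int.mod v 2 = 0)) : Int),
       (row.countP (fun v => decide (PySem.Int.mod v 2 = 1)) : Int),
       (col.countP (fun v => decide (PySem.Int.mod v 2 = 0)) : Int),
       (col.countP (fun v => decide (PySem.Int.mod v 2 = 1)) : Int)) := by
  have hz : (row.zip col).length = n.toNat := by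
    rw [List.length_zip, hr, hc, Nat.min_self]
  rw [pyRange_toNat n, show ((n.toNat : Nat) : Int) = ((row.zip col).length : Int) from by rw [hz]]
  rw [PySem.List.foldl_congr_mem _ _ (fun (acc : Int × Int × Int × Int) i =>
      ((if PySem.Int.mod (PySem.List.pyGetD (row.zip col) i (0, 0)).1 2 = 0 then acc.1 + 1 else acc.1),
       (if PySem.Int.mod (PySem.List.pyGetD (row.zip col) i (0, 0)).1 2 = 1 then acc.2.1 + 1 else acc.2.1),
       (if PySem.Int.mod (PySem.List.pyGetD (row.zip col) i (0, 0)).2 2 = 0 then acc.2.2.1 + 1 else acc.2.2.1),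
       (if PySem.Int.mod (PySem.List.pyGetD (row.zip col) i (0, 0)).2 2 = 1 then acc.2.2.2 + 1 else acc.2.2.2)))
      _ (by
        intro acc i hi
        rcases PySem.List.mem_pyRange_one.mp hi with ⟨h0, h1⟩
        have hiz : i < ((row.zip col).length : Int) := h1
        have hirow : i < (row.length : Int) := by rw [hr]; rw [hz] at h1; omega
        have hicol : i < (col.length : Int) := by rw [hc]; rw [hz] at h1; omega
        dsimp only
        rw [PySem.List.pyGetD_eq_getElem _ _ h0 hiz, PySem.List.pyGetD_eq_getElem _ _ h0 hirow,
          PySem.List.pyGetD_eq_getElem _ _ h0 hicol, List.getElem_zip])]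
  rw [PySem.List.foldl_pyRange_zero_pyGetD' (row.zip col) (0, 0)
      (fun (acc : Int × Int × Int × Int) (p : Int × Int) =>
        ((if PySem.Int.mod p.1 2 = 0 then acc.1 + 1 else acc.1),
         (if PySem.Int.mod p.1 2 = 1 then acc.2.1 + 1 else acc.2.1),
         (if PySem.Int.mod p.2 2 = 0 then acc.2.2.1 + 1 else acc.2.2.1),
         (if PySem.Int.mod p.2 2 = 1 then acc.2.2.2 + 1 else acc.2.2.2))) (0, 0, 0, 0)]
  rw [PySem.List.foldl_prod_mk
      (f := fun (a : Int) (p : Int × Int) => if PySem.Int.mod p.1 2 = 0 then a + 1 else a)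
      (g := fun (t : Int × Int × Int) (p : Int × Int) =>
        ((if PySem.Int.mod p.1 2 = 1 then t.1 + 1 else t.1),
         (if PySem.Int.mod p.2 2 = 0 then t.2.1 + 1 else t.2.1),
         (if PySem.Int.mod p.2 2 = 1 then t.2.2 + 1 else t.2.2)))]
  rw [PySem.List.foldl_prod_mk
      (f := fun (a : Int) (p : Int × Int) => if PySem.Int.mod p.1 2 = 1 then a + 1 else a)
      (g := fun (t : Int × Int) (p : Int × Int) =>
        ((if PySem.Int.mod p.2 2 = 0 then t.1 + 1 else t.1),
         (if PySem.Int.mod p.2 2 = 1 then t.2 + 1 else t.2)))]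
  rw [PySem.List.foldl_prod_mk
      (f := fun (a : Int) (p : Int × Int) => if PySem.Int.mod p.2 2 = 0 then a + 1 else a)
      (g := fun (a : Int) (p : Int × Int) => if PySem.Int.mod p.2 2 = 1 then a + 1 else a)]
  rw [PySem.List.foldl_ite_add_one (fun p : Int × Int => PySem.Int.mod p.1 2 = 0),
    PySem.List.foldl_ite_add_one (fun p : Int × Int => PySem.Int.mod p.1 2 = 1),
    PySem.List.foldl_ite_add_one (fun p : Int × Int => PySem.Int.mod p.2 2 = 0),
    PySem.List.foldl_ite_add_one (fun p : Int × Int => PySem.Int.mod p.2 2 = 1)]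
  rw [countP_zip_fst row col (by omega) (fun v => decide (PySem.Int.mod v 2 = 0)),
    countP_zip_fst row col (by omega) (fun v => decide (PySem.Int.mod v 2 = 1)),
    countP_zip_snd row col (by omega) (fun v => decide (PySem.Int.mod v 2 = 0)),
    countP_zip_snd row col (by omega) (fun v => decide (PySem.Int.mod v 2 = 1))]
  simp

theorem mod2_cases (a : Int) : PySem.Int.mod a 2 = 0 ∨ PySem.Int.mod a 2 = 1 := by
  rw [PySem.Int.mod_eq_emod_of_pos (by norm_num)]
  omega

-- the even-count of one grid row col.map (a + ·), by the parity of a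
theorem countRow (a : Int) (col : List Int) :
    (col.map (fun b => a + b)).countP (fun v => decide (PySem.Int.mod v 2 = 0))
      = if PySem.Int.mod a 2 = 0
          then col.countP (fun v => decide (PySem.Int.mod v 2 = 0))
          else col.countP (fun v => decide (PySem.Int.mod v 2 = 1)) := by
  rw [List.countP_map]
  have ha := mod2_cases a
  split_ifs with h <;>
  · apply List.countP_congr
    intro b _
    simp only [Function.comp_apply]
    have hiff : (PySem.Int.mod (a + b) 2 = 0) ↔ (PySem.Int.mod b 2 = if PySem.Int.mod a 2 = 0 then 0 else 1) := by
      simp only [PySem.Int.mod_eq_emod_of_pos (show (0:Int) < 2 by norm_num)] at *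
      split_ifs at * <;> omega
    simp only [hiff, h]
    simp

theorem sum_if_parity (row : List Int) (c1 c2 : Int) :
    (row.map (fun a => if PySem.Int.mod a 2 = 0 then c1 else c2)).sum
      = (row.countP (fun v => decide (PySem.Int.mod v 2 = 0)) : Int) * c1
        + (row.countP (fun v => decide (PySem.Int.mod v 2 = 1)) : Int) * c2 := by
  induction row with
  | nil => simp
  | cons a row ih =>
    rcases mod2_cases a with h | h
    · have b1 : (decide (PySem.Int.mod a 2 = 0)) = true := decide_eq_true h
      have b2 : (decide (PySem.Int.mod a 2 = 1)) = false := by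
        apply decide_eq_false
        rw [h]
        norm_num
      rw [List.map_cons, List.sum_cons, List.countP_cons, List.countP_cons, ih,
        if_pos h, b1, b2]
      simp
      ring
    · have h0 : ¬ (PySem.Int.mod a 2 = 0) := by rw [h]; norm_num
      have b1 : (decide (PySem.Int.mod a 2 = 0)) = false := decide_eq_false h0
      have b2 : (decide (PySem.Int.mod a 2 = 1)) = true := decide_eq_true h
      rw [List.map_cons, List.sum_cons, List.countP_cons, List.countP_cons, ih,
        if_neg h0, b1, b2]
      simp
      ring

-- the full-grid scan of the represented grid is A's product of parity counts
theorem final_count (row col : List Int) :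
    (GG row col).foldl (fun acc r =>
        r.foldl (fun a v => if PySem.Int.mod v 2 = 0 then a + 1 else a) acc) 0
      = (row.countP (fun v => decide (PySem.Int.mod v 2 = 0)) : Int)
          * (col.countP (fun v => decide (PySem.Int.mod v 2 = 0)) : Int)
        + (row.countP (fun v => decide (PySem.Int.mod v 2 = 1)) : Int)
          * (col.countP (fun v => decide (PySem.Int.mod v 2 = 1)) : Int) := by
  rw [PySem.List.foldl_congr_mem _ _ (fun (acc : Int) (r : List Int) =>
      acc + (r.countP (fun v => decide (PySem.Int.mod v 2 = 0)) : Int)) _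
      (by
        intro acc r _
        exact PySem.List.foldl_ite_add_one (fun v => PySem.Int.mod v 2 = 0) r acc)]
  rw [PySem.List.foldl_add]
  have hmap : (GG row col).map
        (fun r => (r.countP (fun v => decide (PySem.Int.mod v 2 = 0)) : Int))
      = row.map (fun a => if PySem.Int.mod a 2 = 0
          then (col.countP (fun v => decide (PySem.Int.mod v 2 = 0)) : Int)
          else (col.countP (fun v => decide (PySem.Int.mod v 2 = 1)) : Int)) := by
    unfold GG
    rw [List.map_map]
    apply List.map_congr_left
    intro a _
    simp only [Function.comp_apply, countRow]
    split_ifs <;> rfl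
  rw [hmap, sum_if_parity]
  ring

-- ===== VERDICT (by name: the statement is the Claim_ definition above) =====
theorem findNumberOfEvenCells_spec : Claim_equal_findNumberOfEvenCells := by
  intro n q size _ hpre
  obtain ⟨hsz, hq⟩ := hpre
  show findNumberOfEvenCells n q size = findNumberOfEvenCells_alt n q size
  simp only [findNumberOfEvenCells, findNumberOfEvenCells_alt]
  have hks : size.toNat ≤ q.length := by omega
  rw [pyRange_toNat size, foldl_pyRange_take q [] stepA _ size.toNat hks,
    foldl_pyRange_take q [] (stepB n) _ size.toNat hks]
  have hlen0 : ((PySem.List.pyRange 0 n 1).map (fun _ => (0 : Int))).length = n.toNat := by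
    rw [List.length_map, PySem.List.length_pyRange_one]; omega
  have hgrid0 : (PySem.List.pyRange 0 n 1).map (fun _ => List.replicate n.toNat (0 : Int))
      = GG ((PySem.List.pyRange 0 n 1).map (fun _ => (0 : Int)))
           ((PySem.List.pyRange 0 n 1).map (fun _ => (0 : Int))) := by
    unfold GG
    rw [List.map_map]
    apply List.map_congr_left
    intro j _
    simp only [Function.comp_apply, List.map_map]
    symm
    rw [List.eq_replicate_iff]
    constructor
    · rw [List.length_map, PySem.List.length_pyRange_one]
      norm_num
    · intro b hb
      simp only [List.mem_map, Function.comp_apply] at hb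
      obtain ⟨_, _, hb⟩ := hb
      omega
  rw [hgrid0]
  obtain ⟨hG, hl1, hl2⟩ := grid_fold n (q.take size.toNat)
    (fun l hl => ⟨(hq l hl).2.1, (hq l hl).2.2⟩) _ _ hlen0 hlen0
  rw [hG, countA _ _ n hl1 hl2]
  dsimp only
  rw [final_count]
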